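-- pv_equiv track=rewrite | github.com/Achraf-ahrach/N-Puzzle-Solver | solvability.py | get_inversion_count
-- ===== SOURCE A (Python) =====
-- def get_inversion_count(arr, goal):
--     """
--     Count inversions relative to the goal state.
--     """
--     inv_count = 0
--     # Flatten goal if it's 2D
--     flat_goal = [val for row in goal for val in row] if isinstance(goal[0], (list, tuple)) else goal
--
--     # Create a mapping of value to its position in goal
--     goal_pos = {val: idx for idx, val in enumerate(flat_goal)}
--
--     for i in range(len(arr)):
--         for j in range(i + 1, len(arr)):
--             if arr[i] != 0 and arr[j] != 0:
--                 # Compare positions in goal state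
--                 if goal_pos[arr[i]] > goal_pos[arr[j]]:
--                     inv_count += 1
--     return inv_count
-- ===== SOURCE B (Python) =====
-- def get_inversion_count(arr, goal):
--     """
--     Count inversions relative to the goal state (merge-sort inversion count).
--     """
--     # Flatten goal if it's 2D
--     flat_goal = [val for row in goal for val in row] if isinstance(goal[0], (list, tuple)) else goal
--     # Map each value to its position in the goal state
--     goal_pos = {val: idx for idx, val in enumerate(flat_goal)}
--     seq = [goal_pos[x] for x in arr if x != 0]
--
--     def sort_count(xs):
--         if len(xs) < 2:
--             return xs, 0
--         mid = len(xs) // 2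
--         left, lc = sort_count(xs[:mid])
--         right, rc = sort_count(xs[mid:])
--         merged = []
--         cross = 0
--         i = j = 0
--         while i < len(left) and j < len(right):
--             if left[i] <= right[j]:
--                 merged.append(left[i])
--                 i += 1
--             else:
--                 cross += len(left) - i
--                 merged.append(right[j])
--                 j += 1
--         merged.extend(left[i:])
--         merged.extend(right[j:])
--         return merged, lc + rc + cross
--
--     return sort_count(seq)[1]
-- ===== Notes on version B (the rewrite author's own statement) =====
-- stated objective: faster
-- what changed: Replaces the O(n^2) nested index loops with a merge-sort inversion count over the goal-position sequence of the nonzero tiles. Pre_ excludes empty goal (IndexError) and boards with a nonzero tile absent from goal: A raises KeyError there whenever two or more nonzero tiles exist, and B's comprehension raises KeyError even when only one does (where A returns 0).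
-- outside the precondition, e.g. on get_inversion_count([5], [1, 2]): A returns 0, B raises KeyError
import Mathlib
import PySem

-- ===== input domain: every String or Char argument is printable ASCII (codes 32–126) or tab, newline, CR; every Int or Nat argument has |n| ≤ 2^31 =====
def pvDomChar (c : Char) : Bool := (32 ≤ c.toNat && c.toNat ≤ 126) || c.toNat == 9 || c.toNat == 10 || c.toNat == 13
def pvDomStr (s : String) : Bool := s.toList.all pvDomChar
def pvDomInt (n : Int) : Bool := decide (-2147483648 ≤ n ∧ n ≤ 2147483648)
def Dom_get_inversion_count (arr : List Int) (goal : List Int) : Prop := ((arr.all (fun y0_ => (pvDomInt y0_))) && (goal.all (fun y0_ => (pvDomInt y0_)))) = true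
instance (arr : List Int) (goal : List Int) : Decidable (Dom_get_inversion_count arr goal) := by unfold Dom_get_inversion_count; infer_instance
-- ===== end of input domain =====

-- B replaces A's nested index loops with a merge-sort inversion count over the
-- goal-position sequence of the nonzero tiles; equivalence on Pre_ is proved below.

-- ===== PORT A =====
-- goal_pos = {val: idx for idx, val in enumerate(flat_goal)} — built verbatim by both Pythons
def pvGoalPos (goal : List Int) : PySem.Dict Int Int :=
  (PySem.List.enumerate goal 0).foldl (fun d p => d.insert p.2 p.1) PySem.Dict.empty

def get_inversion_count (arr : List Int) (goal : List Int) : Int :=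
  -- flat_goal = goal: with goal a flat list of ints, isinstance(goal[0], (list, tuple)) is False
  -- (goal = [] raises IndexError at goal[0] and is excluded by Pre_)
  let goal_pos := pvGoalPos goal
  (PySem.List.pyRange 0 arr.length 1).foldl (fun inv i =>
    (PySem.List.pyRange (i + 1) arr.length 1).foldl (fun inv j =>
      -- goal_pos[arr[k]]: a KeyError is excluded by Pre_, so getD's default is never used
      if PySem.List.pyGetD arr i 0 ≠ 0 ∧ PySem.List.pyGetD arr j 0 ≠ 0 then
        if goal_pos.getD (PySem.List.pyGetD arr j 0) 0 < goal_pos.getD (PySem.List.pyGetD arr i 0) 0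
        then inv + 1 else inv
      else inv) inv) 0

-- ===== PORT B =====
-- the merge loop of sort_count: returns (merged, cross)
def pvMerge : List Int → List Int → List Int × Int
  | [], b => (b, 0)
  | a, [] => (a, 0)
  | x :: a, y :: b =>
    if x ≤ y then
      let r := pvMerge a (y :: b)
      (x :: r.1, r.2)
    else
      let r := pvMerge (x :: a) b
      (y :: r.1, r.2 + ((x :: a).length : Int))

-- sort_count(xs): merge sort returning (sorted list, inversion count)
def pvSortCount (xs : List Int) : List Int × Int :=
  if _h : xs.length < 2 then (xs, 0)
  else
    let mid := xs.length / 2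
    let l := pvSortCount (xs.take mid)
    let r := pvSortCount (xs.drop mid)
    let m := pvMerge l.1 r.1
    (m.1, l.2 + r.2 + m.2)
termination_by xs.length
decreasing_by
  · simp only [List.length_take]; omega
  · simp only [List.length_drop]; omega

def get_inversion_count_alt (arr : List Int) (goal : List Int) : Int :=
  let goal_pos := pvGoalPos goal
  -- seq = [goal_pos[x] for x in arr if x != 0]; a KeyError is excluded by Pre_
  let seq := (arr.filter (fun x => x ≠ 0)).map (fun x => goal_pos.getD x 0)
  (pvSortCount seq).2

-- ===== PRECONDITION & SPEC =====
-- Pre_ excludes empty goal (IndexError at goal[0]) and boards with a nonzero tile absent from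
-- goal: A raises KeyError there whenever two or more nonzero tiles exist, and B's comprehension
-- raises KeyError even when only one does (where A returns 0).
def Pre_get_inversion_count (arr : List Int) (goal : List Int) : Prop :=
  goal ≠ [] ∧ ∀ x ∈ arr, x ≠ 0 → x ∈ goal
instance (arr : List Int) (goal : List Int) : Decidable (Pre_get_inversion_count arr goal) := by
  unfold Pre_get_inversion_count; infer_instance

def pvWitness_get_inversion_count : List Int × List Int := ([3, 1, 2, 0], [1, 2, 3, 0])

def Spec_get_inversion_count (arr : List Int) (goal : List Int) (out : Int) : Prop := out = get_inversion_count_alt arr goal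
instance (arr : List Int) (goal : List Int) (out : Int) : Decidable (Spec_get_inversion_count arr goal out) := by unfold Spec_get_inversion_count; infer_instance

-- ===== CLAIM (what is proved, stated in full; the proofs are below) =====
def Claim_equal_get_inversion_count : Prop := ∀ (arr : List Int) (goal : List Int), Dom_get_inversion_count arr goal → Pre_get_inversion_count arr goal → Spec_get_inversion_count arr goal (get_inversion_count arr goal)

-- ===== LEMMAS AND PROOFS =====

-- mathematical inversion count of a sequence
def invSpec : List Int → Int
  | [] => 0
  | x :: xs => (xs.countP (fun y => decide (y < x)) : Int) + invSpec xs

-- cross inversions between two parts: pairs (x ∈ a, y ∈ b) with y < x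
def crossSpec (a b : List Int) : Int :=
  (b.map (fun y => (a.countP (fun x => decide (y < x)) : Int))).sum

theorem crossSpec_nil_left (b : List Int) : crossSpec [] b = 0 := by
  simp [crossSpec]

theorem crossSpec_cons_left (x : Int) (a b : List Int) :
    crossSpec (x :: a) b = (b.countP (fun y => decide (y < x)) : Int) + crossSpec a b := by
  induction b with
  | nil => simp [crossSpec]
  | cons y b ih =>
    simp only [crossSpec, List.map_cons, List.sum_cons, List.countP_cons] at *
    by_cases h : y < x <;> simp [h] at * <;> omega

theorem crossSpec_cons_right (y : Int) (a b : List Int) :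
    crossSpec a (y :: b) = (a.countP (fun x => decide (y < x)) : Int) + crossSpec a b := by
  simp [crossSpec]

theorem crossSpec_perm_left {a a' : List Int} (h : a.Perm a') (b : List Int) :
    crossSpec a b = crossSpec a' b := by
  simp [crossSpec, h.countP_eq]

theorem crossSpec_perm_right (a : List Int) {b b' : List Int} (h : b.Perm b') :
    crossSpec a b = crossSpec a b' :=
  List.Perm.sum_eq (h.map _)

theorem invSpec_append (a b : List Int) :
    invSpec (a ++ b) = invSpec a + invSpec b + crossSpec a b := by
  induction a with
  | nil => simp [invSpec, crossSpec_nil_left]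
  | cons x a ih =>
    simp only [List.cons_append, invSpec, List.countP_append, ih, crossSpec_cons_left]
    push_cast; ring

theorem pvMerge_perm (a b : List Int) : (pvMerge a b).1.Perm (a ++ b) := by
  fun_induction pvMerge with
  | case1 b => simp
  | case2 a h => simp
  | case3 x a y b hle r ih => exact List.Perm.cons x ih
  | case4 x a y b hle r ih => exact (List.Perm.cons y ih).trans List.perm_middle.symm

theorem pvMerge_sorted {a b : List Int} (ha : a.Pairwise (· ≤ ·)) (hb : b.Pairwise (· ≤ ·)) :
    (pvMerge a b).1.Pairwise (· ≤ ·) := by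
  fun_induction pvMerge with
  | case1 b => exact hb
  | case2 a h => exact ha
  | case3 x a y b hle r ih =>
    refine List.Pairwise.cons (fun z hz => ?_) (ih ha.tail hb)
    have hz' : z ∈ a ++ y :: b := (pvMerge_perm a (y :: b)).mem_iff.mp hz
    rcases List.mem_append.mp hz' with h1 | h1
    · exact (List.pairwise_cons.mp ha).1 z h1
    · rcases List.mem_cons.mp h1 with rfl | h2
      · exact hle
      · exact le_trans hle ((List.pairwise_cons.mp hb).1 z h2)
  | case4 x a y b hle r ih =>
    have hyx : y ≤ x := le_of_lt (lt_of_not_ge hle)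
    refine List.Pairwise.cons (fun z hz => ?_) (ih ha hb.tail)
    have hz' : z ∈ x :: a ++ b := (pvMerge_perm (x :: a) b).mem_iff.mp hz
    rcases List.mem_append.mp hz' with h1 | h1
    · rcases List.mem_cons.mp h1 with rfl | h2
      · exact hyx
      · exact le_trans hyx ((List.pairwise_cons.mp ha).1 z h2)
    · exact (List.pairwise_cons.mp hb).1 z h1

theorem pvMerge_count {a b : List Int} (ha : a.Pairwise (· ≤ ·)) (hb : b.Pairwise (· ≤ ·)) :
    (pvMerge a b).2 = crossSpec a b := by
  fun_induction pvMerge with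
  | case1 b => simp [crossSpec_nil_left]
  | case2 a h => simp [crossSpec]
  | case3 x a y b hle r ih =>
    rw [ih ha.tail hb, crossSpec_cons_left]
    have hz : (y :: b).countP (fun z => decide (z < x)) = 0 := by
      rw [List.countP_eq_zero]
      intro z hz
      rcases List.mem_cons.mp hz with rfl | h2
      · simpa using not_lt_of_ge hle
      · simpa using not_lt_of_ge (le_trans hle ((List.pairwise_cons.mp hb).1 z h2))
    rw [hz]; simp
  | case4 x a y b hle r ih =>
    have hyx : y < x := lt_of_not_ge hle
    rw [ih ha hb.tail, crossSpec_cons_right]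
    have hz : (x :: a).countP (fun z => decide (y < z)) = (x :: a).length := by
      rw [List.countP_eq_length]
      intro z hz
      rcases List.mem_cons.mp hz with rfl | h2
      · simpa using hyx
      · simpa using lt_of_lt_of_le hyx ((List.pairwise_cons.mp ha).1 z h2)
    rw [hz]; ring

theorem pvSortCount_eq (xs : List Int) (h : ¬ xs.length < 2) :
    pvSortCount xs =
      ((pvMerge (pvSortCount (xs.take (xs.length / 2))).1
          (pvSortCount (xs.drop (xs.length / 2))).1).1,
        (pvSortCount (xs.take (xs.length / 2))).2 + (pvSortCount (xs.drop (xs.length / 2))).2 +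
          (pvMerge (pvSortCount (xs.take (xs.length / 2))).1
            (pvSortCount (xs.drop (xs.length / 2))).1).2) := by
  rw [pvSortCount]
  simp [h]

theorem pvSortCount_spec (xs : List Int) :
    (pvSortCount xs).1.Perm xs ∧ (pvSortCount xs).1.Pairwise (· ≤ ·) ∧
      (pvSortCount xs).2 = invSpec xs := by
  induction xs using pvSortCount.induct with
  | case1 xs h =>
    rw [pvSortCount, dif_pos h]
    refine ⟨List.Perm.refl xs, ?_, ?_⟩
    · match xs, h with
      | [], _ => simp
      | [x], _ => simp
    · match xs, h with
      | [], _ => simp [invSpec]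
      | [x], _ => simp [invSpec]
  | case2 xs h mid ih1 ih2 =>
    obtain ⟨hlp, hls, hlc⟩ := ih1
    obtain ⟨hrp, hrs, hrc⟩ := ih2
    rw [pvSortCount_eq xs h]
    have hmp := pvMerge_perm (pvSortCount (xs.take (xs.length / 2))).1
      (pvSortCount (xs.drop (xs.length / 2))).1
    have happ : (xs.take (xs.length / 2) ++ xs.drop (xs.length / 2)).Perm xs := by
      rw [List.take_append_drop]
    refine ⟨?_, ?_, ?_⟩
    · exact hmp.trans ((hlp.append hrp).trans happ)
    · exact pvMerge_sorted hls hrs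
    · have hm2 := pvMerge_count hls hrs
      have hcr : crossSpec (pvSortCount (xs.take (xs.length / 2))).1
          (pvSortCount (xs.drop (xs.length / 2))).1
          = crossSpec (xs.take (xs.length / 2)) (xs.drop (xs.length / 2)) := by
        rw [crossSpec_perm_left hlp, crossSpec_perm_right _ hrp]
      have hinv := invSpec_append (xs.take (xs.length / 2)) (xs.drop (xs.length / 2))
      rw [List.take_append_drop] at hinv
      show _ + _ + _ = _
      rw [hm2, hcr, hlc, hrc, hinv]

-- collapse Python's nested 'if's into a single conjunctive test
theorem if_collapse (A C : Prop) [Decidable A] [Decidable C] (n : Int) :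
    (if A then (if C then n + 1 else n) else n) = (if A ∧ C then n + 1 else n) := by
  split_ifs <;> first | rfl | tauto

-- the pairwise sum of per-index suffix counts is invSpec of the filtered, mapped sequence
theorem sum_counts (pos : Int → Int) (arr : List Int) :
    ((List.range arr.length).map (fun k =>
        (((arr.drop (k + 1)).countP (fun v =>
            decide ((arr.getD k 0 ≠ 0 ∧ v ≠ 0) ∧ pos v < pos (arr.getD k 0)))) : Int))).sum
    = invSpec ((arr.filter (fun x => x ≠ 0)).map pos) := by
  induction arr with
  | nil => simp [invSpec]
  | cons x xs ih =>
    rw [List.length_cons, List.range_succ_eq_map, List.map_cons, List.map_map, List.sum_cons]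
    have hmap : List.map ((fun k => ((((x :: xs).drop (k + 1)).countP (fun v =>
          decide (((x :: xs).getD k 0 ≠ 0 ∧ v ≠ 0) ∧ pos v < pos ((x :: xs).getD k 0)))) : Int))
            ∘ Nat.succ) (List.range xs.length)
        = List.map (fun k => (((xs.drop (k + 1)).countP (fun v =>
            decide ((xs.getD k 0 ≠ 0 ∧ v ≠ 0) ∧ pos v < pos (xs.getD k 0)))) : Int))
            (List.range xs.length) := by
      refine List.map_congr_left (fun k _ => ?_)
      simp [Function.comp]
    rw [hmap, ih]
    simp only [List.getD_cons_zero, List.drop_succ_cons, List.drop_zero]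
    by_cases hx : x = 0
    · subst hx
      simp
    · have hfil : (x :: xs).filter (fun x => x ≠ 0) = x :: xs.filter (fun x => x ≠ 0) := by
        simp [hx]
      rw [hfil, List.map_cons]
      show _ = invSpec (pos x :: _)
      rw [invSpec]
      have hcnt : xs.countP (fun v => decide ((x ≠ 0 ∧ v ≠ 0) ∧ pos v < pos x))
          = ((xs.filter (fun x => x ≠ 0)).map pos).countP (fun y => decide (y < pos x)) := by
        rw [List.countP_map, List.countP_filter]
        refine List.countP_congr (fun v _ => ?_)
        simp [hx, Function.comp, and_comm]
      omega

theorem fold_eq_invSpec (pos : Int → Int) (arr : List Int) :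
    (PySem.List.pyRange 0 arr.length 1).foldl (fun inv i =>
      (PySem.List.pyRange (i + 1) arr.length 1).foldl (fun inv j =>
        if PySem.List.pyGetD arr i 0 ≠ 0 ∧ PySem.List.pyGetD arr j 0 ≠ 0 then
          if pos (PySem.List.pyGetD arr j 0) < pos (PySem.List.pyGetD arr i 0)
          then inv + 1 else inv
        else inv) inv) 0
    = invSpec ((arr.filter (fun x => x ≠ 0)).map pos) := by
  rw [PySem.List.foldl_congr_mem' (PySem.List.pyRange 0 arr.length 1) _
    (fun inv i => inv + (((arr.drop (i + 1).toNat).countP (fun v =>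
        decide ((PySem.List.pyGetD arr i 0 ≠ 0 ∧ v ≠ 0) ∧
          pos v < pos (PySem.List.pyGetD arr i 0)))) : Int)) 0 ?_]
  · rw [PySem.List.foldl_add]
    rw [PySem.List.pyRange_zero_natCast, List.map_map, zero_add]
    have : ∀ k : ℕ, ((fun i : Int => (((arr.drop (i + 1).toNat).countP (fun v =>
          decide ((PySem.List.pyGetD arr i 0 ≠ 0 ∧ v ≠ 0) ∧
            pos v < pos (PySem.List.pyGetD arr i 0)))) : Int)) ∘ (fun k : ℕ => (k : Int))) k
        = (((arr.drop (k + 1)).countP (fun v =>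
            decide ((arr.getD k 0 ≠ 0 ∧ v ≠ 0) ∧ pos v < pos (arr.getD k 0)))) : Int) := by
      intro k
      have h1 : ((k : Int) + 1).toNat = k + 1 := by omega
      simp only [Function.comp, PySem.List.pyGetD_natCast, h1]
    rw [List.map_congr_left (fun k _ => this k)]
    exact sum_counts pos arr
  · intro i hi inv
    have h0i : 0 ≤ i := (PySem.List.mem_pyRange_one.mp hi).1
    rw [PySem.List.foldl_pyRange_pyGetD' arr 0
      (fun acc v => if PySem.List.pyGetD arr i 0 ≠ 0 ∧ v ≠ 0 then
        if pos v < pos (PySem.List.pyGetD arr i 0) then acc + 1 else acc else acc) inv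
      (by omega)]
    rw [PySem.List.foldl_congr_mem' _ _
      (fun acc v => if (PySem.List.pyGetD arr i 0 ≠ 0 ∧ v ≠ 0) ∧
          pos v < pos (PySem.List.pyGetD arr i 0) then acc + 1 else acc) inv
      (fun v _ acc => if_collapse _ _ acc)]
    exact PySem.List.foldl_ite_add_one _ _ inv

-- ===== VERDICT (by name: the statement is the Claim_ definition above) =====
theorem get_inversion_count_spec : Claim_equal_get_inversion_count := by
  intro arr goal _ _
  unfold Spec_get_inversion_count
  simp only [get_inversion_count, get_inversion_count_alt]
  rw [fold_eq_invSpec (fun v => (pvGoalPos goal).getD v 0) arr]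
  exact ((pvSortCount_spec _).2.2).symm
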